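-- pv_equiv track=rewrite | github.com/JieXW/home | apply_site_data.py | infer_templates
-- ===== SOURCE A (Python) =====
-- def infer_templates(sites):
--     templates = {}
--     for site in sites:
--         primary = site.get("primary", "").strip()
--         secondary = site.get("secondary", "").strip()
--         if not primary:
--             continue
--         templates.setdefault(primary, [])
--         if secondary and secondary not in templates[primary]:
--             templates[primary].append(secondary)
--     return templates
-- ===== SOURCE B (Python) =====
-- def infer_templates(sites):
--     pairs = [(site.get("primary", "").strip(), site.get("secondary", "").strip())
--              for site in sites]
--     primaries = list(dict.fromkeys(p for p, _ in pairs if p))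
--     return {p: list(dict.fromkeys(s for q, s in pairs if q == p and s))
--             for p in primaries}
-- ===== Notes on version B (the rewrite author's own statement) =====
-- stated objective: alternative
-- what changed: A builds the dict incrementally in one loop with setdefault and a per-append membership test; B first flattens all sites to stripped (primary, secondary) pairs, computes the ordered distinct primaries, then builds the result per primary by gathering and order-preserving-deduplicating that primary's nonempty secondaries from the flat pair list.
import Mathlib
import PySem

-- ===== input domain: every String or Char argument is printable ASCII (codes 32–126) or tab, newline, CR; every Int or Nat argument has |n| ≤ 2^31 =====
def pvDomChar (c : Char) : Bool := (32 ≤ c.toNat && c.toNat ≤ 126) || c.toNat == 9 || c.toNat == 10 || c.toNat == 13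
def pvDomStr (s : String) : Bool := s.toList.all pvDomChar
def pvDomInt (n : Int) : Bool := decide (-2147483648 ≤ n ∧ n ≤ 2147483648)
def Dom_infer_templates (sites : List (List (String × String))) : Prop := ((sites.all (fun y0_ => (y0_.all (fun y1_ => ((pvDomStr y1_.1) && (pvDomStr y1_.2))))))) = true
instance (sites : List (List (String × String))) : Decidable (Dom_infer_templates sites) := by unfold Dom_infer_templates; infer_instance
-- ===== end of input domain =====

-- B flattens sites to stripped pairs, lists the distinct primaries, then gathers each primary's deduped secondaries from the flat list; same return value as A.

-- ===== PORT A =====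
-- one step of A's loop body
def inferStepA (d : PySem.Dict String (List String)) (site : List (String × String)) :
    PySem.Dict String (List String) :=
  let primary := PySem.Str.strip ((PySem.Dict.ofList site).getD "primary" "")
  let secondary := PySem.Str.strip ((PySem.Dict.ofList site).getD "secondary" "")
  if primary = "" then d
  else
    let d := d.setdefault primary []
    if secondary ≠ "" ∧ secondary ∉ d.getD primary [] then
      d.insert primary (d.getD primary [] ++ [secondary])
    else d

def infer_templates (sites : List (List (String × String))) : List (String × List String) :=
  (sites.foldl inferStepA PySem.Dict.empty).items

-- ===== PORT B =====
-- the stripped ("primary", "secondary") pair of one site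
def stripPair (site : List (String × String)) : String × String :=
  (PySem.Str.strip ((PySem.Dict.ofList site).getD "primary" ""),
   PySem.Str.strip ((PySem.Dict.ofList site).getD "secondary" ""))

def infer_templates_alt (sites : List (List (String × String))) : List (String × List String) :=
  let pairs := sites.map stripPair
  let primaries := PySem.List.dedup ((pairs.filter (fun q => q.1 != "")).map Prod.fst)
  primaries.map (fun p =>
    (p, PySem.List.dedup ((pairs.filter (fun q => q.1 == p && q.2 != "")).map Prod.snd)))

-- ===== PRECONDITION & SPEC =====
def Spec_infer_templates (sites : List (List (String × String))) (out : List (String × List String)) : Prop := out = infer_templates_alt sites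
instance (sites : List (List (String × String))) (out : List (String × List String)) : Decidable (Spec_infer_templates sites out) := by unfold Spec_infer_templates; infer_instance

-- ===== CLAIM (what is proved, stated in full; the proofs are below) =====
def Claim_equal_infer_templates : Prop := ∀ (sites : List (List (String × String))), Dom_infer_templates sites → Spec_infer_templates sites (infer_templates sites)

-- ===== LEMMAS AND PROOFS =====

-- A's loop body on the already-stripped pair
def stepP (d : PySem.Dict String (List String)) (q : String × String) :
    PySem.Dict String (List String) :=
  if q.1 = "" then d
  else
    let d := d.setdefault q.1 []
    if q.2 ≠ "" ∧ q.2 ∉ d.getD q.1 [] then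
      d.insert q.1 (d.getD q.1 [] ++ [q.2])
    else d

def prims (l : List (String × String)) : List String :=
  PySem.List.dedup ((l.filter (fun q => q.1 != "")).map Prod.fst)

def vals (l : List (String × String)) (p : String) : List String :=
  PySem.List.dedup ((l.filter (fun q => q.1 == p && q.2 != "")).map Prod.snd)

theorem fold_char (l : List (String × String)) :
    (l.foldl stepP PySem.Dict.empty).keys = prims l ∧
    ∀ p, p ≠ "" → (l.foldl stepP PySem.Dict.empty).getD p [] = vals l p := by
  induction l using List.reverseRecOn with
  | nil => exact ⟨rfl, fun p _ => rfl⟩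
  | append_singleton l x ih =>
    obtain ⟨ihk, ihv⟩ := ih
    rw [List.foldl_append, List.foldl_cons, List.foldl_nil]
    set D := l.foldl stepP PySem.Dict.empty with hD
    by_cases h1 : x.1 = ""
    · constructor
      · rw [show stepP D x = D by simp [stepP, h1], ihk]
        simp [prims, List.filter_append, h1]
      · intro p hp
        rw [show stepP D x = D by simp [stepP, h1], ihv p hp]
        have hf : (x.1 == p) = false := by
          simp only [beq_eq_false_iff_ne, ne_eq]
          exact fun hc => hp (hc ▸ h1)
        simp [vals, List.filter_append, List.filter, hf]
    · -- x.1 nonempty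
      have hcont : D.contains x.1 = decide (x.1 ∈ prims l) := by
        rw [PySem.Dict.contains_eq_decide_mem_keys, ihk]
      constructor
      · -- keys
        unfold stepP
        simp only [h1, if_false]
        have hk : (D.setdefault x.1 []).keys = PySem.Set.add (prims l) x.1 := by
          by_cases hm : x.1 ∈ prims l
          · rw [PySem.Dict.setdefault_of_contains D [] (by rw [hcont]; simp [hm]), ihk,
              PySem.Set.add_of_mem hm]
          · rw [PySem.Dict.setdefault_of_not_contains D [] (by rw [hcont]; simp [hm]),
              PySem.Dict.keys_insert_of_not_contains D _ (by rw [hcont]; simp [hm]), ihk,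
              PySem.Set.add_of_not_mem hm]
        have hprims : prims (l ++ [x]) = PySem.Set.add (prims l) x.1 := by
          simp only [prims, List.filter_append, List.map_append, PySem.List.dedup_eq_ofList]
          rw [show List.filter (fun q => q.1 != "") [x] = [x] by simp [h1],
            List.map_singleton, PySem.Set.ofList_append_singleton]
        rw [hprims]
        split
        · next hc =>
          rw [PySem.Dict.keys_insert_of_contains _ _
            (by rw [PySem.Dict.contains_setdefault]; simp), hk]
        · exact hk
      · -- values
        intro p hp
        have hvals : vals (l ++ [x]) p =
            if x.1 = p then (if x.2 = "" then vals l p else PySem.Set.add (vals l p) x.2)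
            else vals l p := by
          simp only [vals, List.filter_append, List.map_append, PySem.List.dedup_eq_ofList]
          by_cases he : x.1 = p
          · by_cases hs : x.2 = ""
            · simp [he, hs]
            · rw [if_pos he, if_neg hs,
                show List.filter (fun q => q.1 == p && q.2 != "") [x] = [x] by simp [he, hs],
                List.map_singleton, PySem.Set.ofList_append_singleton]
          · simp [he]
        unfold stepP
        simp only [h1, if_false]
        by_cases he : x.1 = p
        · subst he
          rw [hvals, if_pos rfl]
          have hsd : (D.setdefault x.1 []).getD x.1 [] = vals l x.1 := by
            rw [PySem.Dict.getD_setdefault_self, ihv x.1 h1]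
          by_cases hs : x.2 = ""
          · rw [if_pos hs, if_neg (show ¬(x.2 ≠ "" ∧ x.2 ∉ (D.setdefault x.1 []).getD x.1 [])
              from fun hc => hc.1 hs)]
            exact hsd
          · rw [if_neg hs]
            by_cases hmem : x.2 ∈ vals l x.1
            · rw [if_neg (by rw [hsd]; exact fun hc => hc.2 hmem), hsd,
                PySem.Set.add_of_mem hmem]
            · rw [if_pos (by rw [hsd]; exact ⟨hs, hmem⟩), PySem.Dict.getD_insert_self, hsd,
                PySem.Set.add_of_not_mem hmem]
        · rw [hvals, if_neg he]
          have hne : p ≠ x.1 := fun hc => he hc.symm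
          have hsd : (D.setdefault x.1 []).getD p [] = vals l p := by
            rw [PySem.Dict.getD_eq_get?_getD, PySem.Dict.get?_setdefault_of_ne _ _ hne,
              ← PySem.Dict.getD_eq_get?_getD, ihv p hp]
          split
          · rw [PySem.Dict.getD_eq_get?_getD, PySem.Dict.get?_insert_of_ne _ _ hne,
              ← PySem.Dict.getD_eq_get?_getD, hsd]
          · exact hsd

theorem mem_prims_ne_empty (l : List (String × String)) (p : String) (h : p ∈ prims l) :
    p ≠ "" := by
  rw [prims, PySem.List.dedup_eq_ofList, PySem.Set.mem_ofList] at h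
  obtain ⟨q, hq, rfl⟩ := List.mem_map.mp h
  have := List.of_mem_filter hq
  simpa using this

-- ===== VERDICT (by name: the statement is the Claim_ definition above) =====
theorem infer_templates_spec : Claim_equal_infer_templates := by
  intro sites _
  unfold Spec_infer_templates infer_templates infer_templates_alt
  have hstep : sites.foldl inferStepA PySem.Dict.empty
      = (sites.map stripPair).foldl stepP PySem.Dict.empty := by
    rw [List.foldl_map]
    rfl
  set l := sites.map stripPair with hl
  obtain ⟨hk, hv⟩ := fold_char l
  rw [hstep,
    PySem.Dict.items_eq_map_keys _ (by rw [hk, prims, PySem.List.dedup_eq_ofList]; exact PySem.Set.nodup_ofList _) [],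
    hk]
  apply List.map_congr_left
  intro p hp
  rw [hv p (mem_prims_ne_empty l p hp)]
  rfl
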